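-- pv_equiv track=rewrite | github.com/gedaliahs/sdexe | sdexe/tools.py | generate_lorem
-- ===== SOURCE A (Python) =====
-- def generate_lorem(paragraphs: int = 3) -> str:
--     """Generate lorem ipsum placeholder text."""
--     base = [
--         "Lorem ipsum dolor sit amet, consectetur adipiscing elit. Sed do eiusmod tempor incididunt ut labore et dolore magna aliqua. Ut enim ad minim veniam, quis nostrud exercitation ullamco laboris nisi ut aliquip ex ea commodo consequat.",
--         "Duis aute irure dolor in reprehenderit in voluptate velit esse cillum dolore eu fugiat nulla pariatur. Excepteur sint occaecat cupidatat non proident, sunt in culpa qui officia deserunt mollit anim id est laborum.",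
--         "Sed ut perspiciatis unde omnis iste natus error sit voluptatem accusantium doloremque laudantium, totam rem aperiam, eaque ipsa quae ab illo inventore veritatis et quasi architecto beatae vitae dicta sunt explicabo.",
--         "Nemo enim ipsam voluptatem quia voluptas sit aspernatur aut odit aut fugit, sed quia consequuntur magni dolores eos qui ratione voluptatem sequi nesciunt. Neque porro quisquam est, qui dolorem ipsum quia dolor sit amet.",
--         "At vero eos et accusamus et iusto odio dignissimos ducimus qui blanditiis praesentium voluptatum deleniti atque corrupti quos dolores et quas molestias excepturi sint occaecati cupiditate non provident.",
--     ]
--     result = []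
--     for i in range(paragraphs):
--         result.append(base[i % len(base)])
--     return "\n\n".join(result)
-- ===== SOURCE B (Python) =====
-- def generate_lorem(paragraphs: int = 3) -> str:
--     """Generate lorem ipsum placeholder text."""
--     base = [
--         "Lorem ipsum dolor sit amet, consectetur adipiscing elit. Sed do eiusmod tempor incididunt ut labore et dolore magna aliqua. Ut enim ad minim veniam, quis nostrud exercitation ullamco laboris nisi ut aliquip ex ea commodo consequat.",
--         "Duis aute irure dolor in reprehenderit in voluptate velit esse cillum dolore eu fugiat nulla pariatur. Excepteur sint occaecat cupidatat non proident, sunt in culpa qui officia deserunt mollit anim id est laborum.",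
--         "Sed ut perspiciatis unde omnis iste natus error sit voluptatem accusantium doloremque laudantium, totam rem aperiam, eaque ipsa quae ab illo inventore veritatis et quasi architecto beatae vitae dicta sunt explicabo.",
--         "Nemo enim ipsam voluptatem quia voluptas sit aspernatur aut odit aut fugit, sed quia consequuntur magni dolores eos qui ratione voluptatem sequi nesciunt. Neque porro quisquam est, qui dolorem ipsum quia dolor sit amet.",
--         "At vero eos et accusamus et iusto odio dignissimos ducimus qui blanditiis praesentium voluptatum deleniti atque corrupti quos dolores et quas molestias excepturi sint occaecati cupiditate non provident.",
--     ]
--     return "\n\n".join((base * (paragraphs // len(base) + 1))[:paragraphs])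
-- ===== Notes on version B (the rewrite author's own statement) =====
-- stated objective: simpler
-- what changed: The per-index append loop with modulo cycling is replaced by list multiplication (base * (paragraphs // len(base) + 1)) plus a slice [:paragraphs], then one join; there is no loop at all.
import Mathlib
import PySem

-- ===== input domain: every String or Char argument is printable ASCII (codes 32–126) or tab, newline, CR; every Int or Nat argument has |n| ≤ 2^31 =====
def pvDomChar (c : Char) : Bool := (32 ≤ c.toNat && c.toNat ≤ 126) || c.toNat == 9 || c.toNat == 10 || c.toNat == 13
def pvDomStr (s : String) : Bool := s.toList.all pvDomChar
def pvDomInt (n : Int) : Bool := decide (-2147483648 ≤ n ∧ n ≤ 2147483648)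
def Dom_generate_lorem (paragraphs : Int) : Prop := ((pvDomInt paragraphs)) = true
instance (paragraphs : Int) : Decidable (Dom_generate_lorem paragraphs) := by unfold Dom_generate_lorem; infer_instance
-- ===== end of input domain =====

-- B replaces A's index-modulo append loop by list multiplication plus a slice and a single join (objective: simpler).

-- ===== PORT A =====
-- the shared `base` constant of both Pythons
def pvBase : List String := [
  "Lorem ipsum dolor sit amet, consectetur adipiscing elit. Sed do eiusmod tempor incididunt ut labore et dolore magna aliqua. Ut enim ad minim veniam, quis nostrud exercitation ullamco laboris nisi ut aliquip ex ea commodo consequat.",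
  "Duis aute irure dolor in reprehenderit in voluptate velit esse cillum dolore eu fugiat nulla pariatur. Excepteur sint occaecat cupidatat non proident, sunt in culpa qui officia deserunt mollit anim id est laborum.",
  "Sed ut perspiciatis unde omnis iste natus error sit voluptatem accusantium doloremque laudantium, totam rem aperiam, eaque ipsa quae ab illo inventore veritatis et quasi architecto beatae vitae dicta sunt explicabo.",
  "Nemo enim ipsam voluptatem quia voluptas sit aspernatur aut odit aut fugit, sed quia consequuntur magni dolores eos qui ratione voluptatem sequi nesciunt. Neque porro quisquam est, qui dolorem ipsum quia dolor sit amet.",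
  "At vero eos et accusamus et iusto odio dignissimos ducimus qui blanditiis praesentium voluptatum deleniti atque corrupti quos dolores et quas molestias excepturi sint occaecati cupiditate non provident."]

-- base[i % len(base)]: the index 0 ≤ i % 5 < 5 is always in range, so pyGetD is exact here
def generate_lorem (paragraphs : Int) : String :=
  let result : List String :=
    (PySem.List.pyRange 0 paragraphs 1).foldl
      (fun acc i => acc ++ [PySem.List.pyGetD pvBase (PySem.Int.mod i (PySem.List.len pvBase)) ""]) []
  PySem.Str.join "\n\n" result

-- ===== PORT B =====
-- `base * m` (Python list repetition; empty for m ≤ 0, which .toNat matches) then `[:paragraphs]`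
def generate_lorem_alt (paragraphs : Int) : String :=
  PySem.Str.join "\n\n"
    (PySem.List.slice
      ((List.replicate (PySem.Int.floordiv paragraphs (PySem.List.len pvBase) + 1).toNat pvBase).flatten)
      none (some paragraphs))

-- ===== PRECONDITION & SPEC =====
def Spec_generate_lorem (paragraphs : Int) (out : String) : Prop := out = generate_lorem_alt paragraphs
instance (paragraphs : Int) (out : String) : Decidable (Spec_generate_lorem paragraphs out) := by unfold Spec_generate_lorem; infer_instance

-- ===== CLAIM (what is proved, stated in full; the proofs are below) =====
def Claim_equal_generate_lorem : Prop := ∀ (paragraphs : Int), Dom_generate_lorem paragraphs → Spec_generate_lorem paragraphs (generate_lorem paragraphs)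

-- ===== LEMMAS AND PROOFS =====

-- flattening k copies of xs and reading position i gives xs at i mod length
lemma cycle_getD {α : Type} (xs : List α) (d : α) :
    ∀ (k i : Nat), i < k * xs.length →
      ((List.replicate k xs).flatten).getD i d = xs.getD (i % xs.length) d := by
  intro k
  induction k with
  | zero => intro i h; omega
  | succ k ih =>
      intro i h
      rw [Nat.succ_mul] at h
      have hL : 0 < xs.length := by
        rcases Nat.eq_zero_or_pos xs.length with h0 | h0
        · rw [h0, Nat.mul_zero] at h; omega
        · exact h0
      rw [List.replicate_succ, List.flatten_cons]
      by_cases hi : i < xs.length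
      · rw [List.getD_append _ _ _ _ hi, Nat.mod_eq_of_lt hi]
      · have hi' : xs.length ≤ i := by omega
        rw [List.getD_append_right _ _ _ _ hi', ih (i - xs.length) (by omega),
          Nat.mod_eq_sub_mod hi']

-- the first m elements of the cycled list are base[i % L] for i < m
lemma take_cycle {α : Type} (xs : List α) (d : α) (m k : Nat)
    (h : m ≤ k * xs.length) :
    ((List.replicate k xs).flatten).take m =
      (List.range m).map (fun i => xs.getD (i % xs.length) d) := by
  have hlen : ((List.replicate k xs).flatten).length = k * xs.length := by
    simp [List.length_flatten, List.map_replicate]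
  apply List.ext_getElem
  · simp [hlen]; omega
  · intro i h1 h2
    have hi : i < m := by simp only [List.length_take, hlen] at h1; omega
    rw [List.getElem_take]
    have him : i < k * xs.length := by omega
    rw [show ((List.replicate k xs).flatten)[i] =
          ((List.replicate k xs).flatten).getD i d from
        (List.getD_eq_getElem _ d (by omega)).symm,
      cycle_getD xs d k i him]
    simp

lemma lists_eq (paragraphs : Int) :
    (PySem.List.pyRange 0 paragraphs 1).foldl
      (fun acc i => acc ++ [PySem.List.pyGetD pvBase (PySem.Int.mod i (PySem.List.len pvBase)) ""]) []
    = PySem.List.slice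
        ((List.replicate (PySem.Int.floordiv paragraphs (PySem.List.len pvBase) + 1).toNat pvBase).flatten)
        none (some paragraphs) := by
  have hlen : PySem.List.len pvBase = (5 : Int) := by decide
  rw [PySem.List.foldl_append_singleton_eq_map, hlen]
  rcases le_or_gt paragraphs 0 with hp | hp
  · -- empty range; multiplier ≤ 0 or slice bound ≤ 0: both sides empty
    have ht : (paragraphs - 0).toNat = 0 := by omega
    have hr : PySem.List.pyRange 0 paragraphs 1 = [] := by
      rw [PySem.List.pyRange_one, ht]; rfl
    rw [hr]
    rcases eq_or_lt_of_le hp with hz | hneg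
    · subst hz; decide
    · have hfd : PySem.Int.floordiv paragraphs 5 < 0 := by
        rw [PySem.Int.floordiv_lt_iff_lt_mul (by omega : (0:Int) < 5)]; omega
      have hk0 : (PySem.Int.floordiv paragraphs 5 + 1).toNat = 0 := by omega
      rw [hk0]
      simp [PySem.List.slice]
  · -- positive count
    obtain ⟨m, rfl⟩ : ∃ m : Nat, paragraphs = (m : Int) :=
      ⟨paragraphs.toNat, (Int.toNat_of_nonneg (by omega)).symm⟩
    have hk : (PySem.Int.floordiv (m : Int) 5 + 1).toNat = m / 5 + 1 := by
      rw [show ((5:Int)) = ((5:Nat) : Int) from rfl, PySem.Int.floordiv_natCast]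
      omega
    rw [hk, PySem.List.slice_to_natCast, PySem.List.pyRange_one]
    have hm : m ≤ (m / 5 + 1) * pvBase.length := by
      have h1 := Nat.div_add_mod m 5
      have h2 : m % 5 < 5 := Nat.mod_lt _ (by omega)
      simp only [show pvBase.length = 5 from rfl]
      omega
    rw [take_cycle pvBase "" m (m / 5 + 1) hm, List.map_map]
    simp only [show ((m : Int) - 0).toNat = m by omega]
    apply List.map_congr_left
    intro k hk'
    show PySem.List.pyGetD pvBase (PySem.Int.mod ((0 : Int) + (k : Int)) 5) "" = _
    rw [zero_add, show ((5:Int)) = ((5:Nat) : Int) from rfl, PySem.Int.mod_natCast,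
      PySem.List.pyGetD_natCast, show pvBase.length = 5 from rfl]

-- ===== VERDICT (by name: the statement is the Claim_ definition above) =====
theorem generate_lorem_spec : Claim_equal_generate_lorem := by
  intro p _
  show generate_lorem p = generate_lorem_alt p
  unfold generate_lorem generate_lorem_alt
  rw [lists_eq]
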